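-- pv_equiv track=rewrite | github.com/devaggj/algorithm-tutorial | src/programmers_coding_practice/level_02/42577_telephone_book.py | solution_hash
-- ===== SOURCE A (Python) =====
-- def solution_hash(phone_book):
--     hash_map = {}
--     for each in phone_book:
--         hash_map[each] = 1
--
--     for number in phone_book:
--         prefix = ""
--         for num in number:
--             prefix += num
--             if prefix in hash_map and prefix != number:
--                 return False
--
--     return True
-- ===== SOURCE B (Python) =====
-- def solution_hash(phone_book):
--     prefixes = set()
--     for number in phone_book:
--         for k in range(1, len(number)):
--             prefixes.add(number[:k])
--     return not any(number in prefixes for number in phone_book)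
-- ===== Notes on version B (the rewrite author's own statement) =====
-- stated objective: alternative
-- what changed: B inverts A's lookup direction: instead of hashing the phone numbers and enumerating each number's growing prefixes against that hash with an early return, B collects the set of all proper nonempty prefixes (slices number[:k]) in one pass and then tests each number for membership with a single any().
import Mathlib
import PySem

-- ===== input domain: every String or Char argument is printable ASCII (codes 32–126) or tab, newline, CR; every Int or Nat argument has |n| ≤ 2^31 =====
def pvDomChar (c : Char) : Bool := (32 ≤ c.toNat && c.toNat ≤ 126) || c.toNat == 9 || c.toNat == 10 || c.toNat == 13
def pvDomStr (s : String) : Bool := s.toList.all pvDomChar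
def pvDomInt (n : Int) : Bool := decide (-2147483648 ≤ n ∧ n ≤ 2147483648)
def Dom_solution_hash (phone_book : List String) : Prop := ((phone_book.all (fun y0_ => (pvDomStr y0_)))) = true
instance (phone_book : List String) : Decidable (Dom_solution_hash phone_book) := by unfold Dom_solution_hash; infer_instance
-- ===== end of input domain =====

-- B inverts A's lookup: one pass collects the set of all proper nonempty prefixes, then each number is tested for membership (alternative decomposition, same cost).


-- ===== PORT A =====
-- inner loop 'for num in number: prefix += num; if …: return False'
-- (prefix kept as List Char; 'prefix += num' is 'pfx ++ [c]' — exact for strings)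
def aInner (hm : PySem.Dict String Int) (number : String) : List Char → List Char → Bool
  | _, [] => false
  | pfx, c :: cs =>
      if hm.contains (String.ofList (pfx ++ [c])) && (String.ofList (pfx ++ [c]) != number) then true
      else aInner hm number (pfx ++ [c]) cs

-- outer loop 'for number in phone_book: …'
def aOuter (hm : PySem.Dict String Int) : List String → Bool
  | [] => true
  | number :: rest => if aInner hm number [] number.toList then false else aOuter hm rest

def solution_hash (phone_book : List String) : Bool :=
  let hash_map := phone_book.foldl (fun d each => d.insert each (1 : Int)) PySem.Dict.empty
  aOuter hash_map phone_book

-- ===== PORT B =====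
-- 'for k in range(1, len(number)): prefixes.add(number[:k])'
def bAddPrefixes (s : PySem.Set String) (number : String) : PySem.Set String :=
  (PySem.List.pyRange 1 (PySem.Str.len number) 1).foldl
    (fun s k => s.add (PySem.Str.slice number none (some k))) s

def solution_hash_alt (phone_book : List String) : Bool :=
  let prefixes := phone_book.foldl (fun s number => bAddPrefixes s number) ([] : PySem.Set String)
  !(phone_book.any (fun number => prefixes.contains number))

-- ===== PRECONDITION & SPEC =====
def Spec_solution_hash (phone_book : List String) (out : Bool) : Prop := out = solution_hash_alt phone_book
instance (phone_book : List String) (out : Bool) : Decidable (Spec_solution_hash phone_book out) := by unfold Spec_solution_hash; infer_instance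

-- ===== CLAIM (what is proved, stated in full; the proofs are below) =====
def Claim_equal_solution_hash : Prop := ∀ (phone_book : List String), Dom_solution_hash phone_book → Spec_solution_hash phone_book (solution_hash phone_book)

-- ===== LEMMAS AND PROOFS =====

-- x is a nonempty strict prefix of y (A flags exactly these pairs; the empty
-- string is never flagged, since A builds prefixes one char at a time)
def sPre (x y : String) : Prop := x.toList ≠ [] ∧ x.toList <+: y.toList ∧ x ≠ y

-- some member of pb is a nonempty strict prefix of another member
def Bad (pb : List String) : Prop := ∃ x ∈ pb, ∃ y ∈ pb, sPre x y

theorem contains_hm (pb : List String) (s : String) :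
    ((pb.foldl (fun d each => d.insert each (1 : Int)) PySem.Dict.empty).contains s = true) ↔ s ∈ pb := by
  rw [PySem.Dict.contains_iff_mem_keys,
      PySem.Dict.keys_foldl_insert pb (fun _ _ => (1 : Int)) PySem.Dict.empty]
  simp [PySem.Dict.keys_empty, PySem.Set.update_nil_left, PySem.Set.mem_ofList]

theorem aInner_true_iff (hm : PySem.Dict String Int) (number : String) (cs pfx : List Char) :
    aInner hm number pfx cs = true ↔
      ∃ p, p <+: cs ∧ p ≠ [] ∧ hm.contains (String.ofList (pfx ++ p)) = true ∧
        String.ofList (pfx ++ p) ≠ number := by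
  induction cs generalizing pfx with
  | nil => simp [aInner, List.prefix_nil]
  | cons c cs ih =>
    rw [aInner]
    by_cases h : (hm.contains (String.ofList (pfx ++ [c])) && (String.ofList (pfx ++ [c]) != number)) = true
    · simp only [h, if_true, true_iff]
      rcases Bool.and_eq_true_iff.mp h with ⟨h1, h2⟩
      exact ⟨[c], ⟨cs, rfl⟩, by simp, h1, bne_iff_ne.mp h2⟩
    · rw [if_neg h, ih]
      constructor
      · rintro ⟨p, hp, hne, hc, hnum⟩
        exact ⟨c :: p, List.cons_prefix_cons.mpr ⟨rfl, hp⟩, by simp, by simpa using hc, by simpa using hnum⟩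
      · rintro ⟨p, hp, hne, hc, hnum⟩
        cases p with
        | nil => exact absurd rfl hne
        | cons c' q =>
          rcases List.cons_prefix_cons.mp hp with ⟨rfl, hq⟩
          cases q with
          | nil =>
            exfalso; apply h
            exact Bool.and_eq_true_iff.mpr ⟨by simpa using hc, bne_iff_ne.mpr (by simpa using hnum)⟩
          | cons d t =>
            exact ⟨d :: t, hq, by simp, by simpa using hc, by simpa using hnum⟩

theorem aOuter_false_iff (hm : PySem.Dict String Int) (l : List String) :
    aOuter hm l = false ↔ ∃ n ∈ l, aInner hm n [] n.toList = true := by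
  induction l with
  | nil => simp [aOuter]
  | cons n rest ih =>
    rw [aOuter]
    by_cases h : aInner hm n [] n.toList = true
    · simp [h]
    · simp [h, ih]

theorem A_false_iff (pb : List String) : solution_hash pb = false ↔ Bad pb := by
  unfold solution_hash
  rw [aOuter_false_iff]
  constructor
  · rintro ⟨number, hnum, hin⟩
    rcases (aInner_true_iff _ number number.toList []).mp hin with ⟨p, hp, hpne, hc, hne⟩
    simp only [List.nil_append] at hc hne
    refine ⟨String.ofList p, (contains_hm pb _).mp hc, number, hnum, ?_, ?_, hne⟩
    · simpa [String.toList_ofList] using hpne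
    · simpa [String.toList_ofList] using hp
  · rintro ⟨x, hx, y, hy, hxne, hpre, hne⟩
    refine ⟨y, hy, (aInner_true_iff _ y y.toList []).mpr ?_⟩
    refine ⟨x.toList, hpre, hxne, ?_, ?_⟩
    · simpa [String.ofList_toList] using (contains_hm pb x).mpr hx
    · simpa [String.ofList_toList] using hne

-- B side --------------------------------------------------------------

theorem mem_addPrefixes (s : PySem.Set String) (number x : String) :
    x ∈ bAddPrefixes s number ↔
      x ∈ s ∨ ∃ k : Int, (1 ≤ k ∧ k < PySem.Str.len number) ∧
        x = PySem.Str.slice number none (some k) := by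
  unfold bAddPrefixes
  rw [PySem.Set.mem_foldl_add]
  simp only [PySem.List.mem_pyRange_one]

theorem mem_prefixes (pb : List String) (x : String) : ∀ s : PySem.Set String,
    x ∈ pb.foldl (fun s number => bAddPrefixes s number) s ↔
      x ∈ s ∨ ∃ y ∈ pb, ∃ k : Int, (1 ≤ k ∧ k < PySem.Str.len y) ∧
        x = PySem.Str.slice y none (some k) := by
  induction pb with
  | nil => intro s; simp
  | cons n rest ih =>
    intro s
    rw [List.foldl_cons, ih, mem_addPrefixes]
    constructor
    · rintro ((hs | hk) | ⟨y, hy, hrest⟩)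
      · exact Or.inl hs
      · exact Or.inr ⟨n, List.mem_cons_self, hk⟩
      · exact Or.inr ⟨y, List.mem_cons_of_mem n hy, hrest⟩
    · rintro (hs | ⟨y, hy, hk⟩)
      · exact Or.inl (Or.inl hs)
      · rcases List.mem_cons.mp hy with rfl | hy'
        · exact Or.inl (Or.inr hk)
        · exact Or.inr ⟨y, hy', hk⟩

theorem slice_char (x y : String) :
    (∃ k : Int, (1 ≤ k ∧ k < PySem.Str.len y) ∧ x = PySem.Str.slice y none (some k)) ↔ sPre x y := by
  unfold sPre
  constructor
  · rintro ⟨k, ⟨hk1, hk2⟩, rfl⟩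
    have hlen : PySem.Str.len y = (y.toList.length : Int) := by
      simp [PySem.Str.len_eq]
    have htl : (PySem.Str.slice y none (some k)).toList = y.toList.take k.toNat := by
      rw [PySem.Str.toList_slice, PySem.Chars.slice_eq_listSlice,
        PySem.List.slice_to _ (by omega)]
    have hlt : k.toNat < y.toList.length := by omega
    have hlen' : (y.toList.take k.toNat).length = k.toNat := by
      rw [List.length_take]; omega
    refine ⟨?_, ?_, ?_⟩
    · rw [htl]; intro hnil
      have := congrArg List.length hnil
      rw [hlen'] at this; simp at this; omega
    · rw [htl]; exact List.take_prefix _ _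
    · intro hEq
      have := congrArg (fun s => s.toList.length) hEq
      simp only [htl, hlen'] at this; omega
  · rintro ⟨hne, hpre, hxy⟩
    refine ⟨(x.toList.length : Int), ⟨?_, ?_⟩, ?_⟩
    · have : x.toList.length ≠ 0 := fun h => hne (List.eq_nil_of_length_eq_zero h)
      omega
    · have hle := hpre.length_le
      have h1 : x.toList ≠ y.toList := fun h => hxy (String.toList_inj.mp h)
      have h2 : x.toList.length ≠ y.toList.length := fun h => h1 (hpre.eq_of_length h)
      simp only [PySem.Str.len_eq]
      omega
    · apply String.toList_inj.mp
      rw [PySem.Str.toList_slice, PySem.Chars.slice_eq_listSlice,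
        PySem.List.slice_to _ (by positivity), Int.toNat_natCast]
      exact List.prefix_iff_eq_take.mp hpre

theorem B_false_iff (pb : List String) : solution_hash_alt pb = false ↔ Bad pb := by
  unfold solution_hash_alt Bad
  rw [Bool.not_eq_false', List.any_eq_true]
  constructor
  · rintro ⟨number, hnum, hc⟩
    have hmem := (PySem.Set.contains_iff _ _).mp hc
    rcases (mem_prefixes pb number _).mp hmem with h | ⟨y, hy, hk⟩
    · cases h
    · exact ⟨number, hnum, y, hy, (slice_char number y).mp hk⟩
  · rintro ⟨x, hx, y, hy, hxy⟩
    refine ⟨x, hx, (PySem.Set.contains_iff _ _).mpr ?_⟩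
    exact (mem_prefixes pb x _).mpr (Or.inr ⟨y, hy, (slice_char x y).mpr hxy⟩)

-- ===== VERDICT (by name: the statement is the Claim_ definition above) =====
theorem solution_hash_spec : Claim_equal_solution_hash := by
  intro pb _
  unfold Spec_solution_hash
  rcases hA : solution_hash pb with _ | _ <;> rcases hB : solution_hash_alt pb with _ | _
  · rfl
  · exact absurd ((A_false_iff pb).mp hA) (fun b => by
      have := (B_false_iff pb).mpr b; rw [hB] at this; exact Bool.true_eq_false.mp this)
  · exact absurd ((B_false_iff pb).mp hB) (fun b => by
      have := (A_false_iff pb).mpr b; rw [hA] at this; exact Bool.true_eq_false.mp this)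
  · rfl
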